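-- pv_equiv track=rewrite | github.com/rubenifrah/minimax-manifold-learning | test/test_gudhi_param.py | check_manifold
-- ===== SOURCE A (Python) =====
-- def check_manifold(triangles):
--     edges = {}
--     for t in triangles:
--         tri_edges = [tuple(sorted([t[0], t[1]])),
--                      tuple(sorted([t[1], t[2]])),
--                      tuple(sorted([t[2], t[0]]))]
--         for e in tri_edges:
--             edges[e] = edges.get(e, 0) + 1
--     counts = list(edges.values())
--     nm = sum(1 for c in counts if c > 2)
--     return nm
-- ===== SOURCE B (Python) =====
-- def check_manifold(triangles):
--     # sort-then-scan: flatten all triangle edges, sort them lexicographically,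
--     # then one linear pass over the sorted list counting runs of equal edges
--     # whose length exceeds 2; no dict/counter is built.
--     edges = sorted((min(x, y), max(x, y))
--                    for t in triangles
--                    for (x, y) in ((t[0], t[1]), (t[1], t[2]), (t[2], t[0])))
--     nm = 0
--     i = 0
--     n = len(edges)
--     while i < n:
--         j = i + 1
--         while j < n and edges[j] == edges[i]:
--             j += 1
--         if j - i > 2:
--             nm += 1
--         i = j
--     return nm
-- ===== Notes on version B (the rewrite author's own statement) =====
-- stated objective: alternative
-- what changed: Replaced A's incrementally built hash-dict tally (edges.get(e,0)+1 per edge, then thresholding the dict values) by sort-then-scan: flatten all edges into one list, sort it lexicographically, and count in a single linear pass the runs of equal adjacent edges whose length exceeds 2; no dictionary or per-key counting structure exists.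
import Mathlib
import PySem

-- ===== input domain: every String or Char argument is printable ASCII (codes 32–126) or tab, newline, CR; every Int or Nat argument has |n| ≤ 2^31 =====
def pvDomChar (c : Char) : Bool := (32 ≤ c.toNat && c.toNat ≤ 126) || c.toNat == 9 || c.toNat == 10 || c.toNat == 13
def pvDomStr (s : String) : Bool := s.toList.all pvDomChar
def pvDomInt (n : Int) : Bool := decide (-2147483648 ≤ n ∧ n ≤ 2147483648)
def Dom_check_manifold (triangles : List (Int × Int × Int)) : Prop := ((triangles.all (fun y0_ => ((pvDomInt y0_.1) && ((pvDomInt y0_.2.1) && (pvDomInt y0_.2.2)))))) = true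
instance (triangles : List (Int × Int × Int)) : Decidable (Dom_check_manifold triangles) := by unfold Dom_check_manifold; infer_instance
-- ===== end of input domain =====

-- B replaces A's incrementally built dict of edge counts by sort-then-scan: flatten all edges,
-- sort lexicographically, count runs of equal adjacent edges of length > 2 (alternative, not faster).


-- ===== PORT A =====
-- tuple(sorted([a, b])) for two ints: exact (Python's sort of a 2-list keeps order iff a <= b)
def pairSortedA (a b : Int) : Int × Int := if a ≤ b then (a, b) else (b, a)

def check_manifold (triangles : List (Int × Int × Int)) : Int :=
  -- edges = {}; for t in triangles: ... for e in tri_edges: edges[e] = edges.get(e, 0) + 1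
  -- (edges[e] = edges.get(e, 0) + 1  is exactly  Dict.modify e 0 (· + 1))
  let edges : PySem.Dict (Int × Int) Int :=
    triangles.foldl
      (fun edges t =>
        let tri_edges := [pairSortedA t.1 t.2.1, pairSortedA t.2.1 t.2.2, pairSortedA t.2.2 t.1]
        tri_edges.foldl (fun edges e => edges.modify e 0 (· + 1)) edges)
      PySem.Dict.empty
  let counts := edges.values
  -- nm = sum(1 for c in counts if c > 2)
  counts.foldl (fun nm c => if c > 2 then nm + 1 else nm) 0

-- ===== PORT B =====
-- the outer while loop of Source B: scan the sorted list run by run; the inner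
-- 'while j < n and edges[j] == edges[i]' measuring the run is takeWhile/dropWhile
def scanRunsB (l : List (Int × Int)) : Int :=
  match l with
  | [] => 0
  | x :: xs =>
    (if 1 + (xs.takeWhile (fun z => z == x)).length > 2 then 1 else 0)
      + scanRunsB (xs.dropWhile (fun z => z == x))
termination_by l.length
decreasing_by
  exact Nat.lt_succ_of_le (List.Sublist.length_le (List.dropWhile_sublist _))

def check_manifold_alt (triangles : List (Int × Int × Int)) : Int :=
  -- edges = sorted((min(x,y), max(x,y)) for t in triangles for (x,y) in ...)
  let edges : List (Int × Int) :=
    PySem.List.sorted2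
      (triangles.flatMap (fun t =>
        [(min t.1 t.2.1, max t.1 t.2.1), (min t.2.1 t.2.2, max t.2.1 t.2.2), (min t.2.2 t.1, max t.2.2 t.1)]))
      Prod.fst Prod.snd
  scanRunsB edges

-- ===== PRECONDITION & SPEC =====
def Spec_check_manifold (triangles : List (Int × Int × Int)) (out : Int) : Prop := out = check_manifold_alt triangles
instance (triangles : List (Int × Int × Int)) (out : Int) : Decidable (Spec_check_manifold triangles out) := by unfold Spec_check_manifold; infer_instance

-- ===== CLAIM (what is proved, stated in full; the proofs are below) =====
def Claim_equal_check_manifold : Prop := ∀ (triangles : List (Int × Int × Int)), Dom_check_manifold triangles → Spec_check_manifold triangles (check_manifold triangles)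

-- ===== LEMMAS AND PROOFS =====

-- the flat list of edges both programs count over
def edgesOf (triangles : List (Int × Int × Int)) : List (Int × Int) :=
  triangles.flatMap (fun t =>
    [(min t.1 t.2.1, max t.1 t.2.1), (min t.2.1 t.2.2, max t.2.1 t.2.2), (min t.2.2 t.1, max t.2.2 t.1)])

-- the common target: number of distinct edges occurring more than twice
def distinctGt2 (l : List (Int × Int)) : Nat :=
  (l.toFinset.filter (fun e => 2 < l.count e)).card

-- lexicographic ≤ on pairs of Ints (Python's tuple comparison)
def leLex (a b : Int × Int) : Prop := a.1 < b.1 ∨ (a.1 = b.1 ∧ a.2 ≤ b.2)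

theorem leLex_trans {a b c : Int × Int} (h1 : leLex a b) (h2 : leLex b c) : leLex a c := by
  unfold leLex at *; omega

theorem leLex_antisymm {a b : Int × Int} (h1 : leLex a b) (h2 : leLex b a) : a = b := by
  unfold leLex at *
  have : a.1 = b.1 ∧ a.2 = b.2 := by omega
  exact Prod.ext this.1 this.2

-- the comparison sorted2 uses, and its relation to leLex
def ltB (a b : Int × Int) : Bool :=
  decide (a.1 < b.1) || (!decide (b.1 < a.1) && decide (a.2 < b.2))

theorem ltB_true_leLex {a b : Int × Int} (h : ltB a b = true) : leLex a b := by
  unfold ltB at h; unfold leLex; simp at h; omega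

theorem ltB_false_leLex {a b : Int × Int} (h : ltB a b = false) : leLex b a := by
  unfold ltB at h; unfold leLex; simp at h; omega

theorem pairwise_insertBy (x : Int × Int) (l : List (Int × Int))
    (hl : l.Pairwise leLex) : (PySem.List.insertBy ltB x l).Pairwise leLex := by
  induction l with
  | nil => simp [PySem.List.insertBy]
  | cons y ys ih =>
    rw [List.pairwise_cons] at hl
    by_cases h : ltB x y = true
    · have hxy : leLex x y := ltB_true_leLex h
      simp only [PySem.List.insertBy, h, if_true]
      refine List.pairwise_cons.mpr ⟨?_, List.pairwise_cons.mpr hl⟩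
      intro z hz
      rcases List.mem_cons.mp hz with rfl | hz
      · exact hxy
      · exact leLex_trans hxy (hl.1 z hz)
    · have hyx : leLex y x := ltB_false_leLex (by revert h; cases ltB x y <;> simp)
      simp only [PySem.List.insertBy, h]
      refine List.pairwise_cons.mpr ⟨?_, ih hl.2⟩
      intro z hz
      rcases (PySem.List.mem_insertBy _ _ _ _).mp hz with rfl | hz
      · exact hyx
      · exact hl.1 z hz

theorem pairwise_foldl_insertBy (l acc : List (Int × Int)) (hacc : acc.Pairwise leLex) :
    (l.foldl (fun acc x => PySem.List.insertBy ltB x acc) acc).Pairwise leLex := by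
  induction l generalizing acc with
  | nil => exact hacc
  | cons x xs ih => exact ih _ (pairwise_insertBy x acc hacc)

theorem sorted2_pairwise_leLex (l : List (Int × Int)) :
    (PySem.List.sorted2 l Prod.fst Prod.snd).Pairwise leLex := by
  have h : PySem.List.sorted2 l Prod.fst Prod.snd
      = l.foldl (fun acc x => PySem.List.insertBy ltB x acc) [] := rfl
  rw [h]
  exact pairwise_foldl_insertBy l [] (by simp)

-- x does not reappear after its run in a lex-sorted list
theorem not_mem_dropWhile_self (x : Int × Int) (xs : List (Int × Int))
    (hx : ∀ y ∈ xs, leLex x y) (hp : xs.Pairwise leLex) :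
    x ∉ xs.dropWhile (fun z => z == x) := by
  intro hmem
  cases hdd : xs.dropWhile (fun z => z == x) with
  | nil => rw [hdd] at hmem; simp at hmem
  | cons w ws =>
    rw [hdd] at hmem
    have h0 := List.head?_dropWhile_not (fun z => z == x) xs
    rw [hdd] at h0
    simp only [List.head?_cons] at h0
    have hwx : w ≠ x := by simpa using h0
    have hdsub : (w :: ws).Sublist xs := hdd ▸ List.dropWhile_sublist _
    have hpd : (w :: ws).Pairwise leLex := hp.sublist hdsub
    rcases List.mem_cons.mp hmem with rfl | hmem'
    · exact hwx rfl
    · have hwlex : leLex w x := (List.pairwise_cons.mp hpd).1 x hmem'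
      have hxw : leLex x w := hx w (hdsub.mem (List.mem_cons_self ..))
      exact hwx (leLex_antisymm hwlex hxw)

-- run-length scan of a lex-sorted list counts the distinct elements of multiplicity > 2
theorem scanRunsB_eq_distinctGt2 (l : List (Int × Int)) (hl : l.Pairwise leLex) :
    scanRunsB l = (distinctGt2 l : Int) := by
  induction hn : l.length using Nat.strong_induction_on generalizing l with
  | _ n ih =>
    match l with
    | [] => simp [scanRunsB, distinctGt2]
    | x :: xs =>
      rw [List.pairwise_cons] at hl
      set t := xs.takeWhile (fun z => z == x) with ht
      set d := xs.dropWhile (fun z => z == x) with hd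
      have hxs : t ++ d = xs := List.takeWhile_append_dropWhile ..
      have htx : ∀ z ∈ t, z = x := by
        intro z hz
        have := List.mem_takeWhile_imp hz
        simpa using this
      have hxd : x ∉ d := not_mem_dropWhile_self x xs hl.1 hl.2
      have hcx : (x :: xs).count x = 1 + t.length := by
        rw [← hxs, List.count_cons_self, List.count_append]
        have h1 : t.count x = t.length := by
          rw [List.count_eq_length]; intro z hz; rw [htx z hz]
        have h2 : d.count x = 0 := List.count_eq_zero.mpr hxd
        omega
      have hcy : ∀ y, y ≠ x → (x :: xs).count y = d.count y := by
        intro y hy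
        rw [← hxs, List.count_cons_of_ne (Ne.symm hy), List.count_append]
        have : t.count y = 0 := by
          rw [List.count_eq_zero]; intro hmem; exact hy (htx y hmem)
        omega
      have hfin : (x :: xs).toFinset = insert x d.toFinset := by
        rw [← hxs]
        ext z
        simp only [List.toFinset_cons, List.toFinset_append, Finset.mem_insert,
          Finset.mem_union, List.mem_toFinset]
        constructor
        · rintro (rfl | hz | hz)
          · exact Or.inl rfl
          · exact Or.inl (htx z hz)
          · exact Or.inr hz
        · rintro (rfl | hz)
          · exact Or.inl rfl
          · exact Or.inr (Or.inr hz)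
      have hdg : distinctGt2 (x :: xs)
          = (if 1 + t.length > 2 then 1 else 0) + distinctGt2 d := by
        unfold distinctGt2
        rw [hfin]
        have hxnot : x ∉ d.toFinset := by simpa using hxd
        rw [Finset.filter_insert]
        have hcongr : Finset.filter (fun e => 2 < (x :: xs).count e) d.toFinset
            = Finset.filter (fun e => 2 < d.count e) d.toFinset := by
          apply Finset.filter_congr
          intro y hy
          have hyx : y ≠ x := by
            intro h; rw [h] at hy; exact hxnot hy
          rw [hcy y hyx]
        by_cases hc : 2 < (x :: xs).count x
        · rw [if_pos hc, hcongr, Finset.card_insert_of_notMem (fun h => hxnot (Finset.mem_filter.mp h).1)]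
          rw [hcx] at hc
          rw [if_pos (by omega)]
          omega
        · rw [if_neg hc, hcongr]
          rw [hcx] at hc
          rw [if_neg (by omega)]
          omega
      rw [scanRunsB]
      have hdlen : d.length < n := by
        have := List.Sublist.length_le (List.dropWhile_sublist (l := xs) (fun z => z == x))
        simp only [List.length_cons] at hn
        rw [← hd] at this
        omega
      rw [ih d.length hdlen d (hl.2.sublist (List.dropWhile_sublist _)) rfl]
      rw [hdg]
      push_cast
      split_ifs <;> simp

-- distinctGt2 is invariant under permutation
theorem distinctGt2_perm {l l' : List (Int × Int)} (h : l.Perm l') :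
    distinctGt2 l = distinctGt2 l' := by
  unfold distinctGt2
  rw [List.toFinset_eq_of_perm l l' h]
  congr 1
  apply Finset.filter_congr
  intro y _
  rw [List.Perm.count_eq h]

-- ===== side B: check_manifold_alt computes distinctGt2 of the flat edge list =====
theorem alt_eq (triangles : List (Int × Int × Int)) :
    check_manifold_alt triangles = (distinctGt2 (edgesOf triangles) : Int) := by
  show scanRunsB (PySem.List.sorted2 (edgesOf triangles) Prod.fst Prod.snd) = _
  rw [scanRunsB_eq_distinctGt2 _ (sorted2_pairwise_leLex _)]
  rw [distinctGt2_perm (PySem.List.sorted2_perm ..)]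

-- ===== side A: the dict tally also computes distinctGt2 of the flat edge list =====
theorem pairSortedA_eq (a b : Int) : pairSortedA a b = (min a b, max a b) := by
  unfold pairSortedA
  split_ifs with h <;> simp [min_def, max_def, h]

theorem countP_nodup_eq {l0 l : List (Int × Int)} (p : (Int × Int) → Prop) [DecidablePred p]
    (hn : l0.Nodup) (hm : ∀ x, x ∈ l0 ↔ x ∈ l) :
    l0.countP (fun x => decide (p x)) = (l.toFinset.filter p).card := by
  have hfin : l0.toFinset = l.toFinset := by
    ext z; simp only [List.mem_toFinset, hm]
  have h1 : (l0.filter (fun x => decide (p x))).toFinset = l.toFinset.filter p := by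
    rw [List.toFinset_filter, hfin]
    apply Finset.filter_congr
    intro y _
    simp
  rw [← h1, List.toFinset_card_of_nodup (hn.filter _), List.countP_eq_length_filter]

theorem a_eq (triangles : List (Int × Int × Int)) :
    check_manifold triangles = (distinctGt2 (edgesOf triangles) : Int) := by
  simp only [check_manifold]
  rw [show (fun (edges : PySem.Dict (Int × Int) Int) (t : Int × Int × Int) =>
        let tri_edges := [pairSortedA t.1 t.2.1, pairSortedA t.2.1 t.2.2, pairSortedA t.2.2 t.1]
        tri_edges.foldl (fun edges e => edges.modify e 0 (· + 1)) edges)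
      = (fun edges t =>
        ([pairSortedA t.1 t.2.1, pairSortedA t.2.1 t.2.2, pairSortedA t.2.2 t.1]).foldl
          (fun edges e => edges.modify e 0 (· + 1)) edges) from rfl]
  rw [← List.foldl_flatMap]
  rw [show triangles.flatMap (fun t => [pairSortedA t.1 t.2.1, pairSortedA t.2.1 t.2.2, pairSortedA t.2.2 t.1])
      = edgesOf triangles by simp [edgesOf, pairSortedA_eq]]
  rw [show List.foldl (fun (edges : PySem.Dict (Int × Int) Int) e => edges.modify e 0 (· + 1))
        PySem.Dict.empty (edgesOf triangles)
      = PySem.Dict.counter (edgesOf triangles) from (PySem.Dict.counter_eq_foldl _).symm]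
  rw [show ∀ (d : PySem.Dict (Int × Int) Int), d.values = d.items.map Prod.snd from fun _ => rfl]
  rw [PySem.Dict.items_counter, List.map_map, List.foldl_map]
  rw [PySem.List.foldl_ite_add_one]
  rw [List.countP_congr (q := fun k => decide (2 < (edgesOf triangles).count k))
    (by intro k _; simp only [Function.comp]; by_cases h : 2 < (edgesOf triangles).count k <;>
        simp [h])]
  rw [countP_nodup_eq (fun k => 2 < (edgesOf triangles).count k)
    (PySem.Set.nodup_ofList _) (fun x => PySem.Set.mem_ofList _ _)]
  unfold distinctGt2
  norm_num

-- ===== VERDICT helper =====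
theorem check_manifold_spec_aux (triangles : List (Int × Int × Int)) :
    check_manifold triangles = check_manifold_alt triangles := by
  rw [a_eq, alt_eq]

-- ===== VERDICT (by name: the statement is the Claim_ definition above) =====
theorem check_manifold_spec : Claim_equal_check_manifold := by
  intro triangles _
  exact check_manifold_spec_aux triangles
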